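-- pv_equiv track=rewrite | github.com/AndresGGSS/Football-Championship | soccer.py | clasificador
-- ===== SOURCE A (Python) =====
-- def clasificador(lista_resultados,cantidad):
--     contador = 0
--     clasificados = []
--     resultados_lista = []
--     while lista_resultados != []:
--         if len(clasificados) != cantidad:
--             resultados_lista.append(max(lista_resultados))
--             clasificados.append(max(lista_resultados))
--             numero = lista_resultados.index(max(lista_resultados))
--             lista_resultados.pop(numero)
--             contador = contador + 1
--         else:
--             validador = max(lista_resultados)
--             if clasificados[contador-1][2] == validador[2]:
--                 clasificados.append(validador)
--                 resultados_lista.append(validador)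
--                 numero = lista_resultados.index(max(lista_resultados))
--                 lista_resultados.pop(numero)
--                 contador = contador + 1
--             else:
--                 resultados_lista.append(validador)
--                 numero = lista_resultados.index(max(lista_resultados))
--                 lista_resultados.pop(numero)
--     lista_resultados = resultados_lista
--     return lista_resultados,clasificados
-- ===== SOURCE B (Python) =====
-- def clasificador(lista_resultados, cantidad):
--     # Qualifiers are the top `cantidad` rows of the descending sort; if a leftover row ties
--     # the last qualifier on index 2, the quota is broken and every row from it on qualifies.
--     orden = sorted(lista_resultados, reverse=True)
--     clasificados = orden[:cantidad]
--     resto = orden[cantidad:]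
--     if clasificados and resto:
--         umbral = clasificados[-1][2]
--         for i, fila in enumerate(resto):
--             if fila[2] == umbral:
--                 clasificados += resto[i:]
--                 break
--     return orden, clasificados
-- ===== Notes on version B (the rewrite author's own statement) =====
-- stated objective: faster
-- what changed: Replaces the repeated max/index/pop extraction loop (a linear max scan, index scan and pop per element) by one descending sort plus a single scan of the leftover rows for the first one tying the last qualifier on index 2; Pre_ excludes nonpositive cantidad with a nonempty list (A raises IndexError at cantidad = 0 and accidentally classifies everyone for negative cantidad) and, when cantidad is below the list length, rows shorter than 3 entries (on which the programs raise IndexError on row[2] except in accidental corners).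
-- outside the precondition, e.g. on clasificador([[1, 2, 3]], -1): A returns ([[1, 2, 3]], [[1, 2, 3]]), B returns ([[1, 2, 3]], [])
import Mathlib
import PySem

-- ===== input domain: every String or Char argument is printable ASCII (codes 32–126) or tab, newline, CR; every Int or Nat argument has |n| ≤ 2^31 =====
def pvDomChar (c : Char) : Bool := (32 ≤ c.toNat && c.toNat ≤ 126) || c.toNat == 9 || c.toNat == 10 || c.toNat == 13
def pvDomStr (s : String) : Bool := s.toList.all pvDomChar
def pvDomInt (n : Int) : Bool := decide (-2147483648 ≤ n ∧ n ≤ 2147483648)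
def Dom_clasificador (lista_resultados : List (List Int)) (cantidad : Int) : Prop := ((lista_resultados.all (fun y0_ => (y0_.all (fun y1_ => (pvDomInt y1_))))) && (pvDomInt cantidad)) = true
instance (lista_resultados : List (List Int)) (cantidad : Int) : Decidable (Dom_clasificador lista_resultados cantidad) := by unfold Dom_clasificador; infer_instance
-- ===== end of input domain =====

-- B sorts once and extends the top-cantidad block from the first leftover row tying the last
-- qualifier on index 2 (A is O(n^2) by repeated max/index/pop); the equivalence proved is about
-- the RETURN value only: the Python A empties the caller's list in place, B does not.

-- ===== PORT A =====
-- while loop ported with fuel = initial length (each iteration pops exactly one element)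
def clasLoopA (cantidad : Int) : Nat → List (List Int) → Int → List (List Int) → List (List Int) → List (List Int) × List (List Int)
  | 0, _, _, clasificados, resultados => (resultados, clasificados)
  | fuel + 1, lista, contador, clasificados, resultados =>
    if lista = [] then (resultados, clasificados)
    else
      match PySem.List.max? lista (fun x => x) with
      | none => (resultados, clasificados)
      | some m =>
        match PySem.List.pop? lista (((PySem.List.index? lista m).getD 0 : Nat) : Int) with
        | none => (resultados, clasificados)
        | some (_, rest) =>
          if (clasificados.length : Int) ≠ cantidad then
            clasLoopA cantidad fuel rest (contador + 1) (clasificados ++ [m]) (resultados ++ [m])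
          else
            if ((PySem.List.pyGet? clasificados (contador - 1)).bind
                  (fun r => PySem.List.pyGet? r 2)) == PySem.List.pyGet? m 2 then
              clasLoopA cantidad fuel rest (contador + 1) (clasificados ++ [m]) (resultados ++ [m])
            else
              clasLoopA cantidad fuel rest contador clasificados (resultados ++ [m])

def clasificador (lista_resultados : List (List Int)) (cantidad : Int) : List (List Int) × List (List Int) :=
  clasLoopA cantidad lista_resultados.length lista_resultados 0 [] []

-- ===== PORT B =====
-- the 'for i, fila in enumerate(resto): if fila[2] == umbral: clasificados += resto[i:]; break'
-- loop, as structural recursion over resto (the suffix resto[i:] is the current tail on a hit;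
-- a completed loop appends nothing)
def buscaCorte (umbral : Option Int) : List (List Int) → List (List Int)
  | [] => []
  | fila :: resto =>
    if PySem.List.pyGet? fila 2 == umbral then fila :: resto else buscaCorte umbral resto

-- orden = sorted(lista, reverse=True); clasificados = orden[:cantidad]; resto = orden[cantidad:];
-- if clasificados and resto: umbral = clasificados[-1][2]; <the loop above>
def clasificador_alt (lista_resultados : List (List Int)) (cantidad : Int) : List (List Int) × List (List Int) :=
  let orden := PySem.List.sorted lista_resultados (fun x => x) true
  let clasificados := PySem.List.slice orden none (some cantidad)
  let resto := PySem.List.slice orden (some cantidad) none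
  if clasificados ≠ [] ∧ resto ≠ [] then
    let umbral := (PySem.List.pyGet? clasificados (-1)).bind (fun r => PySem.List.pyGet? r 2)
    (orden, clasificados ++ buscaCorte umbral resto)
  else (orden, clasificados)

-- ===== PRECONDITION & SPEC =====
-- Pre_ excludes nonpositive cantidad with a nonempty list (a qualifier count is positive; A
-- raises IndexError at cantidad = 0 and accidentally classifies everyone for negative cantidad)
-- and, when cantidad < len, rows shorter than 3 entries (on which the programs raise IndexError
-- on row[2] except in accidental corners).
def Pre_clasificador (lista_resultados : List (List Int)) (cantidad : Int) : Prop :=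
  (1 ≤ cantidad ∧ (lista_resultados.length ≤ cantidad.toNat ∨ ∀ r ∈ lista_resultados, 3 ≤ r.length)) ∨
    lista_resultados = []
instance (lista_resultados : List (List Int)) (cantidad : Int) : Decidable (Pre_clasificador lista_resultados cantidad) := by unfold Pre_clasificador; infer_instance

def pvWitness_clasificador : List (List Int) × Int := ([[1, 2, 3], [4, 5, 6]], 1)

def Spec_clasificador (lista_resultados : List (List Int)) (cantidad : Int) (out : List (List Int) × List (List Int)) : Prop := out = clasificador_alt lista_resultados cantidad
instance (lista_resultados : List (List Int)) (cantidad : Int) (out : List (List Int) × List (List Int)) : Decidable (Spec_clasificador lista_resultados cantidad out) := by unfold Spec_clasificador; infer_instance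

-- ===== CLAIM (what is proved, stated in full; the proofs are below) =====
def Claim_equal_clasificador : Prop := ∀ (lista_resultados : List (List Int)) (cantidad : Int), Dom_clasificador lista_resultados cantidad → Pre_clasificador lista_resultados cantidad → Spec_clasificador lista_resultados cantidad (clasificador lista_resultados cantidad)

-- ===== LEMMAS AND PROOFS =====

-- A's loop on an already descending-sorted list (proof-side mirror of clasLoopA's body)
def loopS (cantidad : Int) : List (List Int) → Int → List (List Int) → List (List Int) → List (List Int) × List (List Int)
  | [], _, clasificados, resultados => (resultados, clasificados)
  | m :: t, contador, clasificados, resultados =>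
    if (clasificados.length : Int) ≠ cantidad then
      loopS cantidad t (contador + 1) (clasificados ++ [m]) (resultados ++ [m])
    else
      if ((PySem.List.pyGet? clasificados (contador - 1)).bind
            (fun r => PySem.List.pyGet? r 2)) == PySem.List.pyGet? m 2 then
        loopS cantidad t (contador + 1) (clasificados ++ [m]) (resultados ++ [m])
      else
        loopS cantidad t contador clasificados (resultados ++ [m])

theorem desc_unique (l₁ l₂ : List (List Int)) (hp : l₁.Perm l₂)
    (h₁ : l₁.Pairwise (fun a b => b ≤ a)) (h₂ : l₂.Pairwise (fun a b => b ≤ a)) : l₁ = l₂ := by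
  have hr : l₁.reverse = l₂.reverse := by
    apply PySem.List.eq_of_perm_of_pairwise_le_of_injective (key := fun x : List Int => x)
      (fun a b h => h) ((l₁.reverse_perm.trans hp).trans l₂.reverse_perm.symm)
    · exact (List.pairwise_reverse).2 h₁
    · exact (List.pairwise_reverse).2 h₂
  simpa using congrArg List.reverse hr

theorem loopA_eq_loopS (cantidad : Int) :
    ∀ (fuel : Nat) (lista : List (List Int)), fuel = lista.length →
    ∀ (contador : Int) (clas res : List (List Int)),
    clasLoopA cantidad fuel lista contador clas res
      = loopS cantidad (PySem.List.sorted lista (fun x => x) true) contador clas res := by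
  intro fuel
  induction fuel with
  | zero =>
    intro lista hlen contador clas res
    have : lista = [] := by
      cases lista with | nil => rfl | cons a b => simp at hlen
    subst this
    simp [clasLoopA, loopS, PySem.List.sorted]
  | succ f ih =>
    intro lista hlen contador clas res
    have hlne : lista ≠ [] := by
      intro h; subst h; simp at hlen
    obtain ⟨m, t, hs⟩ : ∃ m t, PySem.List.sorted lista (fun x => x) true = m :: t := by
      cases h : PySem.List.sorted lista (fun x => x) true with
      | nil => exact absurd ((PySem.List.sorted_eq_nil_iff lista _ _).mp h) hlne
      | cons a b => exact ⟨a, b, rfl⟩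
    have hm_mem : m ∈ lista := by
      have : m ∈ PySem.List.sorted lista (fun x => x) true := by rw [hs]; exact List.mem_cons_self
      exact (PySem.List.mem_sorted lista _ _ m).mp this
    -- (a) the max is the head of the descending sort
    have hmax : PySem.List.max? lista (fun x => x) = some m := by
      cases hmx : PySem.List.max? lista (fun x => x) with
      | none => exact absurd ((PySem.List.max?_eq_none_iff lista _).mp hmx) hlne
      | some m' =>
        have h1 : m' ≤ m := by
          have hle : ∀ y ∈ lista, y ≤ m := by
            apply PySem.List.key_head_sorted_rev_ge (κ := List Int) lista (fun x => x) (t := t)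
            convert hs using 2
          exact hle m' (PySem.List.max?_mem hmx)
        have h2 : m ≤ m' := by
          refine PySem.List.max?_isMax (κ := List Int) (key := fun x => x) ?_ m hm_mem
          convert hmx using 2
        rw [le_antisymm h1 h2]
    -- (b) the pop at the index of the max removes one occurrence of the max
    obtain ⟨k, hidx⟩ : ∃ k, PySem.List.index? lista m = some k :=
      Option.isSome_iff_exists.mp ((PySem.List.index?_isSome_iff lista m).mpr hm_mem)
    obtain ⟨hk, hget, -⟩ := PySem.List.getElem_of_index?_eq_some hidx
    have hpop : PySem.List.pop? lista (((PySem.List.index? lista m).getD 0 : Nat) : Int)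
        = some (m, lista.eraseIdx k) := by
      rw [hidx]
      simpa [hget] using PySem.List.pop?_natCast lista k hk
    -- (c)/(d) the rest sorts to the tail of the descending sort
    have hperm : t.Perm (lista.eraseIdx k) := by
      have h1 : (m :: t).Perm lista := by rw [← hs]; exact PySem.List.sorted_perm lista _ _
      have h2 : lista.Perm (m :: lista.eraseIdx k) := by
        rw [← hget]; exact (List.getElem_cons_eraseIdx_perm hk).symm
      exact (h1.trans h2).cons_inv
    have htail : PySem.List.sorted (lista.eraseIdx k) (fun x => x) true = t := by
      apply desc_unique
      · exact (PySem.List.sorted_perm _ _ _).trans hperm.symm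
      · convert PySem.List.sorted_pairwise_rev (κ := List Int) (lista.eraseIdx k) (fun x => x) using 2
      · have hpw : List.Pairwise (fun a b : List Int => b ≤ a)
            (PySem.List.sorted lista (fun x => x) true) := by
          convert PySem.List.sorted_pairwise_rev (κ := List Int) lista (fun x => x) using 2
        rw [hs] at hpw
        exact hpw.tail
    have hflen : f = (lista.eraseIdx k).length := by
      rw [List.length_eraseIdx_of_lt hk]; omega
    rw [clasLoopA, if_neg hlne]
    simp only [hmax, hpop]
    rw [hs, loopS]
    split_ifs with h1 h2
    · rw [ih _ hflen, htail]
    · rw [ih _ hflen, htail]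
    · rw [ih _ hflen, htail]

theorem loopS_all (cantidad : Int) :
    ∀ (s : List (List Int)) (contador : Int) (clas res : List (List Int)),
    (cantidad < 0 ∨ cantidad < (clas.length : Int) ∨ (clas.length : Int) + s.length ≤ cantidad) →
    loopS cantidad s contador clas res = (res ++ s, clas ++ s) := by
  intro s
  induction s with
  | nil => intro _ clas res _; simp [loopS]
  | cons m t ih =>
    intro contador clas res h
    have hne : (clas.length : Int) ≠ cantidad := by
      rcases h with h | h | h <;> [omega; omega; (simp [List.length_cons] at h; omega)]
    rw [loopS, if_pos hne, ih]
    · simp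
    · rcases h with h | h | h
      · exact Or.inl h
      · exact Or.inr (Or.inl (by simp; omega))
      · exact Or.inr (Or.inr (by simp at h ⊢; omega))

theorem loopS_phase1 (cantidad : Int) :
    ∀ (n : Nat) (s : List (List Int)) (contador : Int) (clas res : List (List Int)),
    n ≤ s.length → (clas.length : Int) + n = cantidad →
    loopS cantidad s contador clas res
      = loopS cantidad (s.drop n) (contador + n) (clas ++ s.take n) (res ++ s.take n) := by
  intro n
  induction n with
  | zero => intro s contador clas res _ _; simp
  | succ k ih =>
    intro s contador clas res hle hc
    match s with
    | [] => simp at hle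
    | m :: t =>
      have hne : (clas.length : Int) ≠ cantidad := by omega
      rw [loopS, if_pos hne, ih t (contador + 1) (clas ++ [m]) (res ++ [m])
        (by simpa using Nat.lt_succ_iff.mp (Nat.lt_of_lt_of_le (Nat.lt_succ_self k) hle))]
      · have harith : contador + 1 + (k : Int) = contador + ((k : Int) + 1) := by ring
        simp [List.take_succ_cons, List.drop_succ_cons, harith]
      · simp; omega

theorem loopS_phase2 (cantidad : Int) :
    ∀ (s clas res : List (List Int)), clas ≠ [] → (clas.length : Int) = cantidad →
    loopS cantidad s (clas.length : Int) clas res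
      = (res ++ s, clas ++ buscaCorte (clas.getLast?.bind (fun r => PySem.List.pyGet? r 2)) s) := by
  intro s
  induction s with
  | nil => intro clas res _ _; simp [loopS, buscaCorte]
  | cons m t ih =>
    intro clas res hne hc
    have hidx : PySem.List.pyGet? clas ((clas.length : Int) - 1) = clas.getLast? := by
      have h1 : (clas.length : Int) - 1 = ((clas.length - 1 : Nat) : Int) := by
        have := List.length_pos_iff.mpr hne; omega
      rw [h1, PySem.List.pyGet?_natCast, List.getLast?_eq_getElem?]
    have hcomm : (PySem.List.pyGet? m 2 == clas.getLast?.bind (fun r => PySem.List.pyGet? r 2))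
        = (clas.getLast?.bind (fun r => PySem.List.pyGet? r 2) == PySem.List.pyGet? m 2) := by
      simp [BEq.comm]
    rw [loopS, if_neg (by omega)]
    by_cases htie : (clas.getLast?.bind (fun r => PySem.List.pyGet? r 2)) == PySem.List.pyGet? m 2
    · rw [if_pos (by rw [hidx]; exact htie)]
      rw [loopS_all cantidad t _ _ _ (Or.inr (Or.inl (by simp; omega)))]
      rw [buscaCorte, hcomm, htie]
      simp only [if_true]
      simp
    · rw [if_neg (by rw [hidx]; exact htie)]
      rw [ih clas (res ++ [m]) hne hc, buscaCorte, hcomm, Bool.eq_false_iff.mpr htie]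
      simp only [Bool.false_eq_true, if_false]
      simp

-- last element of the top block is the row at index n-1 of the sorted list
theorem getLast_take (s : List (List Int)) (n : Nat) (h1 : 1 ≤ n) (h2 : n ≤ s.length) :
    (s.take n).getLast? = s[n - 1]? := by
  rw [List.getLast?_eq_getElem?, List.length_take, List.getElem?_take_of_lt (by omega)]
  congr 1
  omega

-- both sides written over the sorted list, for 1 ≤ c < length
theorem A_char (l : List (List Int)) (c : Int) (hc1 : 1 ≤ c)
    (hclen : c < (l.length : Int)) :
    clasificador l c
      = ((PySem.List.sorted l (fun x => x) true),
         ((PySem.List.sorted l (fun x => x) true).take c.toNat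
           ++ buscaCorte ((PySem.List.sorted l (fun x => x) true)[c.toNat - 1]?.bind
                (fun r => PySem.List.pyGet? r 2))
              ((PySem.List.sorted l (fun x => x) true).drop c.toNat))) := by
  set s := PySem.List.sorted l (fun x => x) true with hs_def
  have hslen : s.length = l.length := PySem.List.length_sorted l _ _
  set n := c.toNat with hn_def
  have hcn : (n : Int) = c := by omega
  have hn1 : 1 ≤ n := by omega
  have hnlen : n ≤ s.length := by rw [hslen]; omega
  have htake_len : (s.take n).length = n := by simp [hnlen]
  have htake_ne : s.take n ≠ [] := by
    intro h
    have := congrArg List.length h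
    simp [htake_len] at this
    omega
  have hA : clasificador l c = loopS c s 0 [] [] := loopA_eq_loopS c l.length l rfl 0 [] []
  rw [hA, loopS_phase1 c n s 0 [] [] hnlen (by simpa using hcn)]
  have h0n : (0 : Int) + n = ((s.take n).length : Int) := by simp [htake_len]
  simp only [List.nil_append]
  rw [h0n, loopS_phase2 c (s.drop n) (s.take n) (s.take n) htake_ne (by rw [htake_len]; exact hcn)]
  rw [List.take_append_drop, getLast_take s n hn1 hnlen]

theorem B_char (l : List (List Int)) (c : Int) (hc1 : 1 ≤ c)
    (hclen : c < (l.length : Int)) :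
    clasificador_alt l c
      = ((PySem.List.sorted l (fun x => x) true),
         ((PySem.List.sorted l (fun x => x) true).take c.toNat
           ++ buscaCorte ((PySem.List.sorted l (fun x => x) true)[c.toNat - 1]?.bind
                (fun r => PySem.List.pyGet? r 2))
              ((PySem.List.sorted l (fun x => x) true).drop c.toNat))) := by
  set s := PySem.List.sorted l (fun x => x) true with hs_def
  have hslen : s.length = l.length := PySem.List.length_sorted l _ _
  set n := c.toNat with hn_def
  have hn1 : 1 ≤ n := by omega
  have hnlen : n < s.length := by rw [hslen]; omega
  have htake_ne : s.take n ≠ [] := by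
    intro h
    have := congrArg List.length h
    simp [Nat.le_of_lt hnlen] at this
    omega
  have hdrop_ne : s.drop n ≠ [] := by
    intro h
    have := congrArg List.length h
    simp at this
    omega
  show (let orden := s;
        let clasificados := PySem.List.slice orden none (some c);
        let resto := PySem.List.slice orden (some c) none;
        if clasificados ≠ [] ∧ resto ≠ [] then
          let umbral := (PySem.List.pyGet? clasificados (-1)).bind (fun r => PySem.List.pyGet? r 2)
          (orden, clasificados ++ buscaCorte umbral resto)
        else (orden, clasificados)) = _
  simp only []
  rw [PySem.List.slice_to _ (by omega : (0:Int) ≤ c), PySem.List.slice_from _ (by omega : (0:Int) ≤ c), ← hn_def]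
  rw [if_pos ⟨htake_ne, hdrop_ne⟩]
  simp only [PySem.List.pyGet?_neg_one]
  rw [getLast_take s n hn1 (Nat.le_of_lt hnlen)]

-- equality on Pre_
theorem AB_eq (l : List (List Int)) (c : Int) (hpre : Pre_clasificador l c) :
    clasificador l c = clasificador_alt l c := by
  rcases hpre with ⟨hc1, -⟩ | hnil
  · by_cases hbig : (l.length : Int) ≤ c
    · -- everyone qualifies on both sides
      set s := PySem.List.sorted l (fun x => x) true with hs_def
      have hslen : s.length = l.length := PySem.List.length_sorted l _ _
      have hA : clasificador l c = loopS c s 0 [] [] := loopA_eq_loopS c l.length l rfl 0 [] []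
      rw [hA, loopS_all c s 0 [] [] (Or.inr (Or.inr (by simp [hslen]; omega)))]
      show _ = (let orden := s;
        let clasificados := PySem.List.slice orden none (some c);
        let resto := PySem.List.slice orden (some c) none;
        if clasificados ≠ [] ∧ resto ≠ [] then
          let umbral := (PySem.List.pyGet? clasificados (-1)).bind (fun r => PySem.List.pyGet? r 2)
          (orden, clasificados ++ buscaCorte umbral resto)
        else (orden, clasificados))
      simp only []
      rw [PySem.List.slice_to _ (by omega : (0:Int) ≤ c), PySem.List.slice_from _ (by omega : (0:Int) ≤ c)]
      have htake : s.take c.toNat = s := List.take_of_length_le (by omega)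
      have hdrop : s.drop c.toNat = [] := List.drop_eq_nil_of_le (by omega)
      rw [htake, hdrop, if_neg (by simp)]
      simp
    · have hclen : c < (l.length : Int) := by omega
      rw [A_char l c hc1 hclen, B_char l c hc1 hclen]
  · subst hnil
    have hs0 : PySem.List.sorted ([] : List (List Int)) (fun x => x) true = [] :=
      (PySem.List.sorted_eq_nil_iff _ _ _).mpr rfl
    have hslice : PySem.List.slice ([] : List (List Int)) none (some c) = [] :=
      List.eq_nil_iff_forall_not_mem.mpr
        (fun x hx => by simpa using PySem.List.mem_of_mem_slice _ _ _ hx)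
    have hB : clasificador_alt [] c = ([], []) := by
      show (let orden := PySem.List.sorted ([] : List (List Int)) (fun x => x) true;
        let clasificados := PySem.List.slice orden none (some c);
        let resto := PySem.List.slice orden (some c) none;
        if clasificados ≠ [] ∧ resto ≠ [] then
          let umbral := (PySem.List.pyGet? clasificados (-1)).bind (fun r => PySem.List.pyGet? r 2)
          (orden, clasificados ++ buscaCorte umbral resto)
        else (orden, clasificados)) = ([], [])
      simp only [hs0, hslice]
      simp
    rw [hB]
    rfl

-- ===== VERDICT (by name: the statement is the Claim_ definition above) =====
theorem clasificador_spec : Claim_equal_clasificador := by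
  intro lista_resultados cantidad _hdom hpre
  exact AB_eq lista_resultados cantidad hpre
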